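-- pv_equiv track=rewrite | github.com/TeresaZhang11/Selenium_currency | main2.py | paren_checker
-- ===== SOURCE A (Python) =====
-- from collections import deque
--
-- def paren_checker(input: str) -> str:
--     ans = ""
--     stk = deque()
--     for c in input:
--         #如果是左括号 先加到栈上 输出先加‘x' 后面遇到右括号再进一步处理
--         if c == '(':
--             ans += 'x'
--             stk.append(c)
--         #遇到右括号
--         elif c == ')':
--             #如果空栈 直接加
--             if not stk:
--                 ans += '?'
--                 stk.append(c)
--                 continue
--             #如果不是空栈 检查左括号是否存在
--             top = stk[-1]
--             if top == '(':
--                 stk.pop()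
--                 #找到输出里面最后一个x 用‘  ’代替
--                 lastx = ans.rfind('x')
--                 ans = ans[:lastx] + ' ' + ans[lastx+1: ]
--             else:
--                 #前面还是右括号 消不掉
--                 ans += '?'
--                 stk.append(c)
--
--         #忽视除括号以外的字符
--         else:
--             ans += ' '
--     ans = input + '\n' + ans
--     return ans
-- ===== SOURCE B (Python) =====
-- def paren_checker(input: str) -> str:
--     # char buffer + stack of positions of yet-unmatched opening parens;
--     # a matching closing paren blanks its partner by direct assignment.
--     out = []
--     opens = []
--     for c in input:
--         if c == '(':
--             opens.append(len(out))
--             out.append('x')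
--         elif c == ')':
--             if opens:
--                 out[opens.pop()] = ' '
--             else:
--                 out.append('?')
--         else:
--             out.append(' ')
--     return input + '\n' + ''.join(out)
-- ===== Notes on version B (the rewrite author's own statement) =====
-- stated objective: alternative
-- what changed: B keeps a char buffer and a stack of positions of unmatched opening parens and blanks the partner position by direct assignment, instead of A's deque of paren chars with an rfind plus string-slicing rebuild of the answer on every matched closing paren.
import Mathlib
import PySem

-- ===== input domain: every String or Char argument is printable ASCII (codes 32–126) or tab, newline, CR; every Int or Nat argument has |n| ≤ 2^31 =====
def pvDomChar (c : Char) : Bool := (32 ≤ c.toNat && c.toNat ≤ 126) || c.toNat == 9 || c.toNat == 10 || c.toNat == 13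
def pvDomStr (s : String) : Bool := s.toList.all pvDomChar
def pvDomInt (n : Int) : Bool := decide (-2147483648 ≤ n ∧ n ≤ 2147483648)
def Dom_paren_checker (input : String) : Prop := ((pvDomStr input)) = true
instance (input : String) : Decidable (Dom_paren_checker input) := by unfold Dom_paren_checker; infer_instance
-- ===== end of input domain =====

-- B replaces A's rfind + string-slicing rebuild on every matched ')' by a char buffer plus a
-- stack of positions of unmatched '(', blanking the partner position by direct assignment.


-- ===== PORT A =====
-- A's for-loop; state (ans, stk); stk head = top of A's deque (append/pop/[-1] act at the head)
def parenLoopA (cs : List Char) (ans stk : List Char) : List Char :=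
  match cs with
  | [] => ans
  | c :: rest =>
    if c = '(' then parenLoopA rest (ans ++ ['x']) ('(' :: stk)
    else if c = ')' then
      match stk with
      | [] => parenLoopA rest (ans ++ ['?']) [')']
      | top :: stk' =>
        if top = '(' then
          let lastx := PySem.Chars.rfind ans ['x']
          parenLoopA rest
            (PySem.List.slice ans none (some lastx) ++ [' '] ++
              PySem.List.slice ans (some (lastx + 1)) none)
            stk'
        else parenLoopA rest (ans ++ ['?']) (')' :: top :: stk')
    else parenLoopA rest (ans ++ [' ']) stk

def paren_checker (input : String) : String :=
  String.ofList (input.toList ++ '\n' :: parenLoopA input.toList [] [])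

-- ===== PORT B =====
-- Source B's loop; state (out, opens); opens head = most recently pushed position of an unmatched '('
def parenLoopB (cs : List Char) (out : List Char) (opens : List Nat) : List Char :=
  match cs with
  | [] => out
  | c :: rest =>
    if c = '(' then parenLoopB rest (out ++ ['x']) (out.length :: opens)
    else if c = ')' then
      match opens with
      | [] => parenLoopB rest (out ++ ['?']) []
      | j :: js => parenLoopB rest (out.set j ' ') js
    else parenLoopB rest (out ++ [' ']) opens

def paren_checker_alt (input : String) : String :=
  String.ofList (input.toList ++ '\n' :: parenLoopB input.toList [] [])

-- ===== PRECONDITION & SPEC =====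
def Spec_paren_checker (input : String) (out : String) : Prop := out = paren_checker_alt input
instance (input : String) (out : String) : Decidable (Spec_paren_checker input out) := by unfold Spec_paren_checker; infer_instance

-- ===== CLAIM (what is proved, stated in full; the proofs are below) =====
def Claim_equal_paren_checker : Prop := ∀ (input : String), Dom_paren_checker input → Spec_paren_checker input (paren_checker input)

-- ===== LEMMAS AND PROOFS =====

-- one-step unfoldings of the two loops
lemma loopA_open (rest ans stk : List Char) :
    parenLoopA ('(' :: rest) ans stk = parenLoopA rest (ans ++ ['x']) ('(' :: stk) := by
  rw [parenLoopA.eq_def]; simp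

lemma loopA_close_nil (rest ans : List Char) :
    parenLoopA (')' :: rest) ans [] = parenLoopA rest (ans ++ ['?']) [')'] := by
  rw [parenLoopA.eq_def]; simp

lemma loopA_close_open (rest ans stk' : List Char) :
    parenLoopA (')' :: rest) ans ('(' :: stk')
      = parenLoopA rest
          (PySem.List.slice ans none (some (PySem.Chars.rfind ans ['x'])) ++ [' '] ++
            PySem.List.slice ans (some (PySem.Chars.rfind ans ['x'] + 1)) none) stk' := by
  rw [parenLoopA.eq_def]; simp

lemma loopA_close_close (rest ans stk' : List Char) :
    parenLoopA (')' :: rest) ans (')' :: stk')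
      = parenLoopA rest (ans ++ ['?']) (')' :: ')' :: stk') := by
  rw [parenLoopA.eq_def]; simp

lemma loopA_other (c : Char) (rest ans stk : List Char) (h1 : ¬ c = '(') (h2 : ¬ c = ')') :
    parenLoopA (c :: rest) ans stk = parenLoopA rest (ans ++ [' ']) stk := by
  rw [parenLoopA.eq_def]; simp [h1, h2]

lemma loopB_open (rest : List Char) (out : List Char) (opens : List Nat) :
    parenLoopB ('(' :: rest) out opens
      = parenLoopB rest (out ++ ['x']) (out.length :: opens) := by
  rw [parenLoopB.eq_def]; simp

lemma loopB_close_nil (rest : List Char) (out : List Char) :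
    parenLoopB (')' :: rest) out [] = parenLoopB rest (out ++ ['?']) [] := by
  rw [parenLoopB.eq_def]; simp

lemma loopB_close_cons (rest : List Char) (out : List Char) (j : Nat) (js : List Nat) :
    parenLoopB (')' :: rest) out (j :: js) = parenLoopB rest (out.set j ' ') js := by
  rw [parenLoopB.eq_def]; simp

lemma loopB_other (c : Char) (rest : List Char) (out : List Char) (opens : List Nat)
    (h1 : ¬ c = '(') (h2 : ¬ c = ')') :
    parenLoopB (c :: rest) out opens = parenLoopB rest (out ++ [' ']) opens := by
  rw [parenLoopB.eq_def]; simp [h1, h2]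

-- [c].isPrefixOf t is exactly "t starts with c"
lemma prefix_singleton (c : Char) (t : List Char) :
    [c].isPrefixOf t = true ↔ t.head? = some c := by
  cases t with
  | nil => simp [List.isPrefixOf]
  | cons a t' => simp [List.isPrefixOf]; exact ⟨fun h => by simp [h], fun h => by simp [h]⟩

-- rfind.go returns j when s has 'x' at j and no occurrence after j
lemma rfind_go_eq (s : List Char) (j : Nat)
    (hj : s[j]? = some 'x')
    (hlast : ∀ i, j < i → ([ 'x' ].isPrefixOf (s.drop i)) = false) :
    ∀ k, j ≤ k → PySem.Chars.rfind.go s ['x'] k = (j : Int) := by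
  intro k
  induction k with
  | zero =>
    intro hk
    interval_cases j
    have : (['x'].isPrefixOf s) = true := by
      rw [prefix_singleton]
      simpa [List.head?_eq_getElem?] using hj
    simp [PySem.Chars.rfind.go, this]
  | succ k ih =>
    intro hk
    by_cases hfound : (['x'].isPrefixOf (s.drop (k + 1))) = true
    · have hjk : j = k + 1 := by
        by_contra hne
        have : j < k + 1 := lt_of_le_of_ne hk hne
        exact absurd hfound (by simp [hlast (k+1) this])
      simp [PySem.Chars.rfind.go, hfound, hjk]
    · have hj' : j ≤ k := by
        rcases Nat.lt_or_ge j (k+1) with h | h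
        · omega
        · exfalso
          have : j = k + 1 := le_antisymm hk h
          subst this
          apply hfound
          rw [prefix_singleton]
          simpa [List.head?_eq_getElem?] using hj
      simp only [PySem.Chars.rfind.go]
      rw [if_neg (by simp [hfound])]
      exact ih hj'

-- take j ++ ' ' :: drop (j+1) is set j ' '
lemma set_as_slices (l : List Char) (j : Nat) (h : j < l.length) :
    l.take j ++ ' ' :: l.drop (j + 1) = l.set j ' ' := by
  rw [List.set_eq_take_append_cons_drop, if_pos h]

-- the loop invariant: stk is opens.length '('s over m ')'s, and opens lists (strictly
-- decreasing) exactly the positions of 'x' in ans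
lemma loop_eq (cs : List Char) : ∀ (ans : List Char) (opens : List Nat) (m : Nat),
    opens.Pairwise (· > ·) →
    (∀ i ∈ opens, i < ans.length) →
    (∀ i (_ : i < ans.length), (ans[i] = 'x' ↔ i ∈ opens)) →
    parenLoopA cs ans (List.replicate opens.length '(' ++ List.replicate m ')')
      = parenLoopB cs ans opens := by
  induction cs with
  | nil => intro ans opens m _ _ _; rfl
  | cons c rest ih =>
    intro ans opens m hpw hbd hx
    by_cases hc1 : c = '('
    · -- push
      subst hc1
      rw [loopA_open, loopB_open]
      have hstk : ('(' :: (List.replicate opens.length '(' ++ List.replicate m ')'))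
          = List.replicate (ans.length :: opens).length '(' ++ List.replicate m ')' := by
        simp [List.replicate_succ]
      rw [hstk]
      apply ih _ _ m
      · exact List.Pairwise.cons (fun i hi => hbd i hi) hpw
      · intro i hi
        rcases List.mem_cons.mp hi with hi | hi
        · subst hi; simp
        · have := hbd i hi; simp; omega
      · intro i hilt
        by_cases hi : i < ans.length
        · rw [List.getElem_append_left hi]
          rw [hx i hi]
          constructor
          · intro h; exact List.mem_cons_of_mem _ h
          · intro h
            rcases List.mem_cons.mp h with h | h
            · omega
            · exact h
        · have : i = ans.length := by simp at hilt; omega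
          subst this
          simp
    · by_cases hc2 : c = ')'
      · subst hc2
        cases opens with
        | nil =>
          cases m with
          | zero =>
            simp only [List.length_nil, List.replicate_zero, List.nil_append]
            rw [loopA_close_nil, loopB_close_nil]
            have h1 : ([')'] : List Char)
                = List.replicate ([] : List Nat).length '(' ++ List.replicate 1 ')' := by rfl
            rw [h1]
            refine ih _ _ 1 ?_ ?_ ?_
            · simp
            · simp
            intro i hilt
            by_cases hi : i < ans.length
            · rw [List.getElem_append_left hi]; rw [hx i hi]
            · have : i = ans.length := by simp at hilt; omega
              subst this; simp
          | succ m' =>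
            simp only [List.length_nil, List.replicate_zero, List.nil_append,
              List.replicate_succ]
            rw [loopA_close_close, loopB_close_nil]
            have h1 : (')' :: ')' :: List.replicate m' ')')
                = List.replicate ([] : List Nat).length '(' ++ List.replicate (m' + 2) ')' := by
              simp [List.replicate_succ]
            rw [h1]
            refine ih _ _ (m' + 2) ?_ ?_ ?_
            · simp
            · simp
            intro i hilt
            by_cases hi : i < ans.length
            · rw [List.getElem_append_left hi]; rw [hx i hi]
            · have : i = ans.length := by simp at hilt; omega
              subst this; simp
        | cons j js =>
          -- matched ')': A pops and rewrites at the last 'x', B sets position j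
          have hjlen : j < ans.length := hbd j (by simp)
          have hjx : ans[j] = 'x' := (hx j hjlen).mpr (by simp)
          have hrfind : PySem.Chars.rfind ans ['x'] = (j : Int) := by
            unfold PySem.Chars.rfind
            apply rfind_go_eq
            · simp [List.getElem?_eq_getElem hjlen, hjx]
            · intro i hji
              by_cases hilen : i < ans.length
              · have hnot : ans[i] ≠ 'x' := by
                  intro h
                  have := (hx i hilen).mp h
                  rcases List.mem_cons.mp this with h' | h'
                  · omega
                  · have := (List.pairwise_cons.mp hpw).1 i h'
                    omega
                by_contra hpre
                have hpre' : (['x'].isPrefixOf (ans.drop i)) = true := by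
                  simpa using hpre
                rw [prefix_singleton] at hpre'
                rw [List.head?_drop] at hpre'
                rw [List.getElem?_eq_getElem hilen] at hpre'
                exact hnot (by simpa using hpre')
              · have : ans.drop i = [] := List.drop_eq_nil_of_le (by omega)
                simp [this]
            · omega
          simp only [List.length_cons, List.replicate_succ, List.cons_append]
          rw [loopA_close_open, loopB_close_cons]
          have harg :
              (PySem.List.slice ans none (some (PySem.Chars.rfind ans ['x'])) ++ [' '] ++
                PySem.List.slice ans (some (PySem.Chars.rfind ans ['x'] + 1)) none)
              = ans.set j ' ' := by
            rw [hrfind]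
            have h1 : ((j : Int) + 1) = ((j + 1 : Nat) : Int) := by push_cast; ring
            rw [h1, PySem.List.slice_to_natCast, PySem.List.slice_from_natCast]
            rw [← set_as_slices ans j hjlen]
            simp
          rw [harg]
          apply ih _ _ m
          · exact (List.pairwise_cons.mp hpw).2
          · intro i hi
            have := hbd i (List.mem_cons_of_mem _ hi)
            simpa using this
          · intro i hilt
            have hilen : i < ans.length := by simpa using hilt
            rw [List.getElem_set]
            by_cases hij : j = i
            · subst hij
              have : j ∉ js := by
                intro h
                have := (List.pairwise_cons.mp hpw).1 j h
                omega
              simp [this]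
            · rw [if_neg hij, hx i hilen]
              constructor
              · intro h
                rcases List.mem_cons.mp h with h | h
                · omega
                · exact h
              · intro h; exact List.mem_cons_of_mem _ h
      · -- other characters
        rw [loopA_other c rest ans _ hc1 hc2, loopB_other c rest ans opens hc1 hc2]
        apply ih _ _ m hpw
        · intro i hi
          have := hbd i hi; simp; omega
        · intro i hilt
          by_cases hi : i < ans.length
          · rw [List.getElem_append_left hi]; exact hx i hi
          · have hieq : i = ans.length := by simp at hilt; omega
            subst hieq
            have : ans.length ∉ opens := fun h => absurd (hbd _ h) (by omega)
            simp [this]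

-- ===== VERDICT (by name: the statement is the Claim_ definition above) =====
theorem paren_checker_spec : Claim_equal_paren_checker := by
  intro input _
  unfold Spec_paren_checker paren_checker paren_checker_alt
  have h := loop_eq input.toList [] [] 0 (by simp) (by simp) (by simp)
  simp only [List.length_nil, List.replicate_zero, List.nil_append] at h
  rw [h]
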